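-- pv_equiv track=rewrite | github.com/LarisaOvchinnikova/python_codewars | Fruit Machine.py | fruit
-- ===== SOURCE A (Python) =====
-- def fruit(reels, spins):
--     score = ['','Jack', 'Queen', 'King', 'Bar', 'Cherry', 'Seven', 'Shell', 'Bell', 'Star', 'Wild']
--     attempt = [reels[0][spins[0]], reels[1][spins[1]], reels[2][spins[2]] ]
--     dct = {el:attempt.count(el) for el in attempt}
--     s = 0
--     for key in dct:
--         if dct[key] == 2:
--             if "Wild" in dct and key !="Wild":
--                 s = s + score.index(key) * 2
--             else:
--                 s = s + score.index(key)
--         elif dct[key] == 3: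
--             s = s + score.index(key) * 10
--     return s
-- ===== SOURCE B (Python) =====
-- def fruit(reels, spins):
--     score = ['','Jack', 'Queen', 'King', 'Bar', 'Cherry', 'Seven', 'Shell', 'Bell', 'Star', 'Wild']
--     a, b, c = reels[0][spins[0]], reels[1][spins[1]], reels[2][spins[2]]
--     if a == b == c:
--         return score.index(a) * 10
--     if a == b or a == c:
--         pair = a
--     elif b == c:
--         pair = b
--     else:
--         return 0
--     base = score.index(pair)
--     return base * 2 if 'Wild' in (a, b, c) and pair != 'Wild' else base
-- ===== Notes on version B (the rewrite author's own statement) =====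
-- stated objective: simpler
-- what changed: B replaces A's count-dictionary plus a loop over its keys with direct pairwise comparisons of the three symbols (triple, pair, or no match) and a single index lookup, maintaining no dictionary.
import Mathlib
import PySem

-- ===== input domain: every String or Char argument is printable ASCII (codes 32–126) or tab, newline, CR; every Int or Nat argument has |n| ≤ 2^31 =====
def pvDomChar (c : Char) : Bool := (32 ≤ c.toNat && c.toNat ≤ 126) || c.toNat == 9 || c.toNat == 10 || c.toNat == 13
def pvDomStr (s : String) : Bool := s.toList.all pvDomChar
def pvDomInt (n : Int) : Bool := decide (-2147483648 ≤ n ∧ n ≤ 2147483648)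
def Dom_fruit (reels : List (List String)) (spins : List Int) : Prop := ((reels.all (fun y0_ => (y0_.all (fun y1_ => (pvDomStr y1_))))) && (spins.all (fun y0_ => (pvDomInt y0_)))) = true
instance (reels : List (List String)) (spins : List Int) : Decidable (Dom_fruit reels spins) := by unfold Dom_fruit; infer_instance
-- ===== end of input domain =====

-- One honest line: B scores the spin by direct pairwise comparison of the three
-- symbols instead of A's count-dictionary and key loop; same values, simpler code.

-- the fixed symbol payout table (shared literal of both Pythons)
def fruitScore : List String :=
  ["", "Jack", "Queen", "King", "Bar", "Cherry", "Seven", "Shell", "Bell", "Star", "Wild"]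

-- score.index(key); total form — Pre_ guarantees the key is in the table whenever it is looked up
def fruitIdx (x : String) : Int := ((PySem.List.index? fruitScore x).getD 0 : Nat)

-- ===== PORT A =====
-- the dict-and-loop body of A, on the three drawn symbols
def fruitLoopA (a b c : String) : Int :=
  let attempt : List String := [a, b, c]
  let dct : PySem.Dict String Int :=
    attempt.foldl (fun d el => d.insert el (PySem.List.count attempt el : Int)) PySem.Dict.empty
  dct.keys.foldl (fun s key =>
    if dct.getD key 0 = 2 then
      if dct.contains "Wild" ∧ key ≠ "Wild" then s + fruitIdx key * 2
      else s + fruitIdx key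
    else if dct.getD key 0 = 3 then s + fruitIdx key * 10
    else s) 0

def fruit (reels : List (List String)) (spins : List Int) : Int :=
  fruitLoopA
    (PySem.List.pyGetD (PySem.List.pyGetD reels 0 []) (PySem.List.pyGetD spins 0 0) "")
    (PySem.List.pyGetD (PySem.List.pyGetD reels 1 []) (PySem.List.pyGetD spins 1 0) "")
    (PySem.List.pyGetD (PySem.List.pyGetD reels 2 []) (PySem.List.pyGetD spins 2 0) "")

-- ===== PORT B =====
-- pairwise-comparison body of B
def fruitCoreB (a b c : String) : Int :=
  if a = b ∧ b = c then fruitIdx a * 10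
  else
    let pair? : Option String :=
      if a = b ∨ a = c then some a else if b = c then some b else none
    match pair? with
    | none => 0
    | some p =>
      let base := fruitIdx p
      if ("Wild" = a ∨ "Wild" = b ∨ "Wild" = c) ∧ p ≠ "Wild" then base * 2 else base

def fruit_alt (reels : List (List String)) (spins : List Int) : Int :=
  fruitCoreB
    (PySem.List.pyGetD (PySem.List.pyGetD reels 0 []) (PySem.List.pyGetD spins 0 0) "")
    (PySem.List.pyGetD (PySem.List.pyGetD reels 1 []) (PySem.List.pyGetD spins 1 0) "")
    (PySem.List.pyGetD (PySem.List.pyGetD reels 2 []) (PySem.List.pyGetD spins 2 0) "")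

-- ===== PRECONDITION & SPEC =====
-- Pre_ excludes exactly the inputs where Python A raises: too few reels/spins,
-- an out-of-range spin index (IndexError), or a matched pair/triple whose symbol
-- is not in the score table (ValueError from score.index).
def Pre_fruit (reels : List (List String)) (spins : List Int) : Prop :=
  2 < reels.length ∧ 2 < spins.length ∧
  PySem.Raise.InRange (PySem.List.pyGetD reels 0 []).length (PySem.List.pyGetD spins 0 0) ∧
  PySem.Raise.InRange (PySem.List.pyGetD reels 1 []).length (PySem.List.pyGetD spins 1 0) ∧
  PySem.Raise.InRange (PySem.List.pyGetD reels 2 []).length (PySem.List.pyGetD spins 2 0) ∧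
  (let a := PySem.List.pyGetD (PySem.List.pyGetD reels 0 []) (PySem.List.pyGetD spins 0 0) ""
   let b := PySem.List.pyGetD (PySem.List.pyGetD reels 1 []) (PySem.List.pyGetD spins 1 0) ""
   let c := PySem.List.pyGetD (PySem.List.pyGetD reels 2 []) (PySem.List.pyGetD spins 2 0) ""
   ((a = b ∨ a = c) → a ∈ fruitScore) ∧ (b = c → b ∈ fruitScore))

instance (reels : List (List String)) (spins : List Int) : Decidable (Pre_fruit reels spins) := by
  unfold Pre_fruit; infer_instance

def pvWitness_fruit : List (List String) × List Int :=
  ([["Jack", "Queen"], ["Jack"], ["Cherry"]], [0, 0, 0])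

def Spec_fruit (reels : List (List String)) (spins : List Int) (out : Int) : Prop := out = fruit_alt reels spins
instance (reels : List (List String)) (spins : List Int) (out : Int) : Decidable (Spec_fruit reels spins out) := by unfold Spec_fruit; infer_instance

-- ===== CLAIM (what is proved, stated in full; the proofs are below) =====
def Claim_equal_fruit : Prop := ∀ (reels : List (List String)) (spins : List Int), Dom_fruit reels spins → Pre_fruit reels spins → Spec_fruit reels spins (fruit reels spins)

-- ===== LEMMAS AND PROOFS =====

-- the two bodies agree on every triple of symbols
set_option maxHeartbeats 2000000 in
theorem fruitCore_eq (a b c : String) : fruitLoopA a b c = fruitCoreB a b c := by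
  by_cases hab : a = b <;> by_cases hac : a = c <;> by_cases hbc : b = c <;>
    simp_all [fruitLoopA, fruitCoreB, PySem.Dict.insert, PySem.Dict.empty, PySem.Dict.keys,
      PySem.Dict.getD, PySem.Dict.get?, PySem.Dict.contains, PySem.List.count, List.count_cons] <;>
    simp_all [eq_comm, or_comm, or_left_comm]

-- ===== VERDICT (by name: the statement is the Claim_ definition above) =====
theorem fruit_spec : Claim_equal_fruit := by
  intro reels spins _ _
  unfold Spec_fruit fruit fruit_alt
  exact fruitCore_eq _ _ _
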